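-- pv_equiv track=rewrite | github.com/bowl1/Hey_write | chatbox-backend/build/lib/langchain_runner/rag_chain.py | _pick_chunk_indices
-- ===== SOURCE A (Python) =====
-- from typing import List, Tuple
--
-- FIRST_CHUNKS = 3
--
-- MIDDLE_CHUNKS = 2
--
-- LAST_CHUNKS = 2
--
-- MAX_SUMMARY_PER_FILE = 8
--
-- def _pick_chunk_indices(count: int) -> List[int]:
--     """Return ordered indices for first/middle/last slices with de-duping."""
--     if count <= 0:
--         return []
--
--     candidates: List[int] = []
--     candidates.extend(range(min(FIRST_CHUNKS, count)))
--
--     mid_indices: List[int] = []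
--     if count > 0:
--         mid_center = count // 2
--         if MIDDLE_CHUNKS >= 2 and count >= 2:
--             mid_indices = [max(0, mid_center - 1), mid_center]
--         else:
--             mid_indices = [mid_center]
--     candidates.extend(mid_indices)
--
--     last_start = max(count - LAST_CHUNKS, 0)
--     candidates.extend(range(last_start, count))
--
--     seen = set()
--     ordered_unique = []
--     for idx in candidates:
--         if 0 <= idx < count and idx not in seen:
--             ordered_unique.append(idx)
--             seen.add(idx)
--
--     ordered_unique.sort()
--     return ordered_unique[:MAX_SUMMARY_PER_FILE]
-- ===== SOURCE B (Python) =====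
-- from typing import List
--
-- FIRST_CHUNKS = 3
--
-- MIDDLE_CHUNKS = 2
--
-- LAST_CHUNKS = 2
--
-- MAX_SUMMARY_PER_FILE = 8
--
-- # Precomputed answers for count = 1..7, where the first/middle/last blocks overlap.
-- _SMALL: List[List[int]] = [
--     [0],
--     [0, 1],
--     [0, 1, 2],
--     [0, 1, 2, 3],
--     [0, 1, 2, 3, 4],
--     [0, 1, 2, 3, 4, 5],
--     [0, 1, 2, 3, 5, 6],
-- ]
--
-- def _pick_chunk_indices(count: int) -> List[int]:
--     """Closed form: for count >= 8 the three blocks are disjoint and already in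
--     order, so the answer is written down directly; counts 1..7 come from a
--     precomputed table. No candidate list, no dedup, no sort."""
--     if count <= 0:
--         return []
--     if count < 8:
--         return list(_SMALL[count - 1])
--     mid = count // 2
--     return [0, 1, 2, mid - 1, mid, count - 2, count - 1]
-- ===== Notes on version B (the rewrite author's own statement) =====
-- stated objective: simpler
-- what changed: B replaces A's candidate-list building, dedup loop and sort by a closed form: for count >= 8 the seven indices [0,1,2,mid-1,mid,count-2,count-1] are emitted directly in order (the three blocks are disjoint and sorted), and counts 1..7 are read from a 7-entry precomputed table.
import Mathlib
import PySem

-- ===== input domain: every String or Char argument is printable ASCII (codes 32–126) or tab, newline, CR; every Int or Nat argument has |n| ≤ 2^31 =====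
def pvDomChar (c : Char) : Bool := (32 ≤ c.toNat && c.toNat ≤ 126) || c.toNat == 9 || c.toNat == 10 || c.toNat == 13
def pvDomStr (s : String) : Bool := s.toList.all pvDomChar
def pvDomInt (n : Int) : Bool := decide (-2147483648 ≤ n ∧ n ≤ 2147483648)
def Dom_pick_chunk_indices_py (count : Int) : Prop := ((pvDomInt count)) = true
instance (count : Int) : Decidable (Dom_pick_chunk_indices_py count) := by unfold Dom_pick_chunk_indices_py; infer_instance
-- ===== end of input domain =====

-- B replaces A's candidate list + dedup loop + sort by a closed form: for count >= 8 the
-- seven indices are written down directly in order; counts 1..7 come from a precomputed table (objective: simpler).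


-- ===== PORT A =====
def pick_chunk_indices_py (count : Int) : List Int :=
  if count ≤ 0 then []
  else
    let candidates : List Int := ([] : List Int) ++ PySem.List.pyRange 0 (min 3 count) 1
    let mid_indices : List Int :=
      if count > 0 then
        let mid_center := PySem.Int.floordiv count 2
        if (2 : Int) ≥ 2 ∧ count ≥ 2 then [max 0 (mid_center - 1), mid_center]
        else [mid_center]
      else []
    let candidates := candidates ++ mid_indices
    let last_start := max (count - 2) 0
    let candidates := candidates ++ PySem.List.pyRange last_start count 1
    let st := candidates.foldl
      (fun (st : PySem.Set Int × List Int) idx =>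
        if 0 ≤ idx ∧ idx < count ∧ PySem.Set.contains st.1 idx = false then
          (PySem.Set.add st.1 idx, st.2 ++ [idx])
        else st)
      (PySem.Set.empty, ([] : List Int))
    (PySem.List.sorted st.2 (fun x => x) false).take 8

-- ===== PORT B =====
-- the _SMALL table of Source B
def pvSmallTable : List (List Int) :=
  [[0], [0, 1], [0, 1, 2], [0, 1, 2, 3], [0, 1, 2, 3, 4], [0, 1, 2, 3, 4, 5], [0, 1, 2, 3, 5, 6]]

def pick_chunk_indices_py_alt (count : Int) : List Int :=
  if count ≤ 0 then []
  else if count < 8 then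
    -- _SMALL[count - 1]: the index is in range under the two guards, so pyGet? is some here
    (PySem.List.pyGet? pvSmallTable (count - 1)).getD []
  else
    let mid := PySem.Int.floordiv count 2
    [0, 1, 2, mid - 1, mid, count - 2, count - 1]

-- ===== PRECONDITION & SPEC =====
def Spec_pick_chunk_indices_py (count : Int) (out : List Int) : Prop := out = pick_chunk_indices_py_alt count
instance (count : Int) (out : List Int) : Decidable (Spec_pick_chunk_indices_py count out) := by unfold Spec_pick_chunk_indices_py; infer_instance

-- ===== CLAIM (what is proved, stated in full; the proofs are below) =====
def Claim_equal_pick_chunk_indices_py : Prop := ∀ (count : Int), Dom_pick_chunk_indices_py count → Spec_pick_chunk_indices_py count (pick_chunk_indices_py count)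

-- ===== LEMMAS AND PROOFS =====

-- A's dedup-and-filter loop, characterised: starting from a Nodup state fed to both the
-- seen set and the output list, it returns that state extended by the in-range new elements.
theorem pv_dedup_loop (count : Int) : ∀ (l s : List Int), s.Nodup →
    ∃ t : List Int,
      l.foldl
        (fun (st : PySem.Set Int × List Int) idx =>
          if 0 ≤ idx ∧ idx < count ∧ PySem.Set.contains st.1 idx = false then
            (PySem.Set.add st.1 idx, st.2 ++ [idx])
          else st) (s, s) = (t, t) ∧
      t.Nodup ∧ (∀ x, x ∈ t ↔ x ∈ s ∨ (x ∈ l ∧ 0 ≤ x ∧ x < count)) := by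
  intro l
  induction l with
  | nil => intro s hs; exact ⟨s, rfl, hs, by simp⟩
  | cons a l ih =>
    intro s hs
    rw [List.foldl_cons]
    by_cases h : 0 ≤ a ∧ a < count ∧ PySem.Set.contains s a = false
    · have hna : a ∉ s := by
        intro hmem
        rw [(PySem.Set.contains_iff (s := s) (x := a)).mpr hmem] at h
        exact absurd h.2.2 (by simp)
      have hadd : PySem.Set.add s a = s ++ [a] := PySem.Set.add_of_not_mem hna
      rw [if_pos h, hadd]
      have hs' : (s ++ [a]).Nodup := by
        rw [List.nodup_append]
        refine ⟨hs, List.nodup_singleton a, ?_⟩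
        intro b hb c hc hbc
        rw [List.mem_singleton] at hc
        subst hc
        exact hna (hbc ▸ hb)
      obtain ⟨t, heq, hnd, hmem⟩ := ih (s ++ [a]) hs'
      refine ⟨t, heq, hnd, fun x => ?_⟩
      rw [hmem x]
      simp only [List.mem_append, List.mem_cons, List.not_mem_nil, or_false]
      constructor
      · rintro ((hx | rfl) | hx)
        · exact Or.inl hx
        · exact Or.inr ⟨Or.inl rfl, h.1, h.2.1⟩
        · exact Or.inr ⟨Or.inr hx.1, hx.2⟩
      · rintro (hx | ⟨(rfl | hx), h1, h2⟩)
        · exact Or.inl (Or.inl hx)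
        · exact Or.inl (Or.inr rfl)
        · exact Or.inr ⟨hx, h1, h2⟩
    · rw [if_neg h]
      obtain ⟨t, heq, hnd, hmem⟩ := ih s hs
      refine ⟨t, heq, hnd, fun x => ?_⟩
      rw [hmem x]
      simp only [List.mem_cons]
      constructor
      · rintro (hx | ⟨hx1, hx2, hx3⟩)
        · exact Or.inl hx
        · exact Or.inr ⟨Or.inr hx1, hx2, hx3⟩
      · rintro (hx | ⟨(rfl | hx'), h1, h2⟩)
        · exact Or.inl hx
        · have hct : PySem.Set.contains s x = true := by
            rcases Bool.eq_false_or_eq_true (PySem.Set.contains s x) with ht | hf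
            · exact ht
            · exact absurd ⟨h1, h2, hf⟩ h
          exact Or.inl ((PySem.Set.contains_iff (s := s) (x := x)).mp hct)
        · exact Or.inr ⟨hx', h1, h2⟩

-- ===== VERDICT (by name: the statement is the Claim_ definition above) =====
theorem pick_chunk_indices_py_spec : Claim_equal_pick_chunk_indices_py := by
  intro count _
  unfold Spec_pick_chunk_indices_py
  by_cases hc : count ≤ 0
  · simp [pick_chunk_indices_py, pick_chunk_indices_py_alt, hc]
  · by_cases h8 : count < 8
    · -- the seven small cases, by computation
      interval_cases count <;> decide
    · -- count ≥ 8: A's sorted dedup of the candidates equals B's closed-form list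
      have hpos : (0 : Int) < count := by omega
      unfold pick_chunk_indices_py pick_chunk_indices_py_alt
      simp only [if_neg hc, if_neg h8]
      obtain ⟨t, heq, hnd, hmem⟩ :=
        pv_dedup_loop count
          ((([] : List Int) ++ PySem.List.pyRange 0 (min 3 count) 1 ++
              if count > 0 then
                if (2 : Int) ≥ 2 ∧ count ≥ 2 then
                  [max 0 (PySem.Int.floordiv count 2 - 1), PySem.Int.floordiv count 2]
                else [PySem.Int.floordiv count 2]
              else []) ++
            PySem.List.pyRange (max (count - 2) 0) count 1) [] List.nodup_nil
      rw [show (PySem.Set.empty, ([] : List Int)) = (([] : List Int), ([] : List Int)) from rfl,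
          heq]
      have hdiv : PySem.Int.floordiv count 2 = count / 2 :=
        PySem.Int.floordiv_eq_ediv_of_pos (by omega)
      have hmin : min 3 count = 3 := by omega
      set b : List Int :=
        [0, 1, 2, count / 2 - 1, count / 2, count - 2, count - 1] with hb
      have hbp : b.Pairwise (· < ·) := by
        have h1 : (4 : Int) ≤ count / 2 := by omega
        have h2 : count / 2 ≤ count - 4 := by omega
        simp only [hb, List.pairwise_cons, List.mem_cons, List.not_mem_nil, or_false]
        refine ⟨?_, ?_, ?_, ?_, ?_, ?_, fun a h => h.elim, List.Pairwise.nil⟩ <;> intro a ha <;> omega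
      have hndb : b.Nodup := hbp.imp (fun h' => ne_of_lt h')
      have hperm : b.Perm t := by
        rw [List.perm_ext_iff_of_nodup hndb hnd]
        intro x
        rw [hmem x]
        simp only [hb, hdiv, hmin, if_pos hpos,
          if_pos (⟨le_refl (2 : Int), by omega⟩ : (2 : Int) ≥ 2 ∧ count ≥ 2),
          List.mem_append, List.mem_cons, List.not_mem_nil, or_false, false_or,
          PySem.List.mem_pyRange_one]
        omega
      dsimp only
      rw [hdiv, PySem.List.sorted_id_eq_of_perm_of_pairwise t b hperm (hbp.imp (fun h' => le_of_lt h'))]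
      simp [hb, List.take_succ_cons]
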